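-- pv_equiv track=rewrite | github.com/MaxGandini/run-fsi-scan | FSI_run_13_meta_scan_7/init.py | classify_points_by_neighbors
-- ===== SOURCE A (Python) =====
-- def classify_points_by_neighbors(buckets):
--     classified = {
--         'quad': [],      # points with 4 neighbors
--         'group': [],     # points with 2 or 3 neighbors
--         'isolated': []   # points with 1 neighbor
--     }
--
--     for tile_coord, points_and_counts in buckets.items():
--         quad_points = [p for p, c in points_and_counts if c == 4]
--         group_points = [p for p, c in points_and_counts if c == 3]
--         isolated_points = [p for p, c in points_and_counts if c == 1]
--
--         if quad_points:
--             classified['quad'].append((tile_coord, quad_points))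
--         if group_points:
--             classified['group'].append((tile_coord, group_points))
--         if isolated_points:
--             classified['isolated'].append((tile_coord, isolated_points))
--
--     return classified
-- ===== SOURCE B (Python) =====
-- def classify_points_by_neighbors(buckets):
--     # One pass over every point: dispatch each point through a count->label table
--     # into a two-level index (label -> tile -> points, both insertion-ordered),
--     # then emit the result dict straight from the index. No per-tile temporary
--     # lists and no emptiness checks: a tile appears under a label iff some point
--     # of it was indexed there.
--     labels = {4: 'quad', 3: 'group', 1: 'isolated'}
--     index = {'quad': {}, 'group': {}, 'isolated': {}}
--     for tile_coord, points_and_counts in buckets.items():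
--         for p, c in points_and_counts:
--             label = labels.get(c)
--             if label is not None:
--                 index[label].setdefault(tile_coord, []).append(p)
--     return {label: list(tiles.items()) for label, tiles in index.items()}
-- ===== Notes on version B (the rewrite author's own statement) =====
-- stated objective: alternative
-- what changed: Replaces A's per-tile triple filtering comprehensions plus emptiness-guarded appends with a two-level insertion-ordered dict index (label -> tile -> points) filled in one dispatch pass over all points and emitted directly; the Lean Pre_ only excludes association lists with duplicate tile keys, which cannot arise from a Python dict.
import Mathlib
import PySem

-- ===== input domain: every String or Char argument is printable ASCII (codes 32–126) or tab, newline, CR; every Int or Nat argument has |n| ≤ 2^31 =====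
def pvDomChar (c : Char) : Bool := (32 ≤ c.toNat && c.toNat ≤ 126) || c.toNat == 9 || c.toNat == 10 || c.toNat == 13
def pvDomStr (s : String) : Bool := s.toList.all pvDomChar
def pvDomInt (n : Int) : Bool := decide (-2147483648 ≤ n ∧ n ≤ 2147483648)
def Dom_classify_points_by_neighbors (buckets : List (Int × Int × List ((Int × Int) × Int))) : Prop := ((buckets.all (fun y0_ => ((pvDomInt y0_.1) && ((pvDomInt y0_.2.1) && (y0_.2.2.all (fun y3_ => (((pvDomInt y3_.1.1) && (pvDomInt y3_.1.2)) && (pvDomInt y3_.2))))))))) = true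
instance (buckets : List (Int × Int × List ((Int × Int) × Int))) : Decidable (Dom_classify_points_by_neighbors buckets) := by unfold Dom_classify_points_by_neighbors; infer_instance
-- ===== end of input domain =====

-- B: instead of A's per-tile triple filters with emptiness-guarded appends, it fills a
-- two-level insertion-ordered dict index (label -> tile -> points) in one dispatch pass
-- over all points and emits the result from it; alternative structure, same cost.


-- ===== PORT A =====
-- Port of A. The dict `classified` has three fixed literal keys, so it is modelled as a
-- triple of lists (quad, group, isolated) carried through the loop over buckets, appended
-- in A's order; the returned dict is the association list in A's insertion order.
def pvStepA (acc : List ((Int × Int) × List (Int × Int)) × List ((Int × Int) × List (Int × Int)) × List ((Int × Int) × List (Int × Int)))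
    (b : Int × Int × List ((Int × Int) × Int)) :
    List ((Int × Int) × List (Int × Int)) × List ((Int × Int) × List (Int × Int)) × List ((Int × Int) × List (Int × Int)) :=
  let tile_coord := (b.1, b.2.1)
  let points_and_counts := b.2.2
  let quad_points := (points_and_counts.filter (fun pc => pc.2 == 4)).map Prod.fst
  let group_points := (points_and_counts.filter (fun pc => pc.2 == 3)).map Prod.fst
  let isolated_points := (points_and_counts.filter (fun pc => pc.2 == 1)).map Prod.fst
  let acc := if quad_points.isEmpty then acc else (acc.1 ++ [(tile_coord, quad_points)], acc.2)
  let acc := if group_points.isEmpty then acc else (acc.1, acc.2.1 ++ [(tile_coord, group_points)], acc.2.2)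
  let acc := if isolated_points.isEmpty then acc else (acc.1, acc.2.1, acc.2.2 ++ [(tile_coord, isolated_points)])
  acc

def classify_points_by_neighbors (buckets : List (Int × Int × List ((Int × Int) × Int))) : List (String × List ((Int × Int) × (List (Int × Int)))) :=
  let classified := buckets.foldl pvStepA ([], [], [])
  [("quad", classified.1), ("group", classified.2.1), ("isolated", classified.2.2)]

-- ===== PORT B =====
-- Port of B. `index` has the three fixed literal labels as keys, so it is a triple of
-- PySem.Dicts (quad, group, isolated), each mapping tile -> point list. The Python
-- `labels.get(c)` dispatch (a 3-key literal dict) is the if-chain on c; Python's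
-- `index[label].setdefault(tile, []).append(p)` is exactly Dict.modify tile [] (· ++ [p]).
def pvStepPoint (tile : Int × Int)
    (idx : PySem.Dict (Int × Int) (List (Int × Int)) × PySem.Dict (Int × Int) (List (Int × Int)) × PySem.Dict (Int × Int) (List (Int × Int)))
    (pc : (Int × Int) × Int) :
    PySem.Dict (Int × Int) (List (Int × Int)) × PySem.Dict (Int × Int) (List (Int × Int)) × PySem.Dict (Int × Int) (List (Int × Int)) :=
  if pc.2 == 4 then (idx.1.modify tile [] (· ++ [pc.1]), idx.2.1, idx.2.2)
  else if pc.2 == 3 then (idx.1, idx.2.1.modify tile [] (· ++ [pc.1]), idx.2.2)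
  else if pc.2 == 1 then (idx.1, idx.2.1, idx.2.2.modify tile [] (· ++ [pc.1]))
  else idx

def classify_points_by_neighbors_alt (buckets : List (Int × Int × List ((Int × Int) × Int))) : List (String × List ((Int × Int) × (List (Int × Int)))) :=
  let index := buckets.foldl (fun idx b => b.2.2.foldl (pvStepPoint (b.1, b.2.1)) idx)
    (PySem.Dict.empty, PySem.Dict.empty, PySem.Dict.empty)
  [("quad", index.1.items), ("group", index.2.1.items), ("isolated", index.2.2.items)]

-- ===== PRECONDITION & SPEC =====
-- Pre_ excludes association lists with duplicate tile keys: a Python dict cannot contain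
-- them, so no Python input is excluded; it is needed because B's index merges equal tiles.
def Pre_classify_points_by_neighbors (buckets : List (Int × Int × List ((Int × Int) × Int))) : Prop :=
  (buckets.map (fun b => (b.1, b.2.1))).Nodup
instance (buckets : List (Int × Int × List ((Int × Int) × Int))) : Decidable (Pre_classify_points_by_neighbors buckets) := by unfold Pre_classify_points_by_neighbors; infer_instance
def pvWitness_classify_points_by_neighbors : (List (Int × Int × List ((Int × Int) × Int))) :=
  [(0, 0, [((1, 2), 4), ((3, 4), 1), ((5, 5), 2)]), (1, 0, [((7, 8), 3)])]
def Spec_classify_points_by_neighbors (buckets : List (Int × Int × List ((Int × Int) × Int))) (out : List (String × List ((Int × Int) × (List (Int × Int))))) : Prop := out = classify_points_by_neighbors_alt buckets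
instance (buckets : List (Int × Int × List ((Int × Int) × Int))) (out : List (String × List ((Int × Int) × (List (Int × Int))))) : Decidable (Spec_classify_points_by_neighbors buckets out) := by unfold Spec_classify_points_by_neighbors; infer_instance

-- ===== CLAIM (what is proved, stated in full; the proofs are below) =====
def Claim_equal_classify_points_by_neighbors : Prop := ∀ (buckets : List (Int × Int × List ((Int × Int) × Int))), Dom_classify_points_by_neighbors buckets → Pre_classify_points_by_neighbors buckets → Spec_classify_points_by_neighbors buckets (classify_points_by_neighbors buckets)

-- ===== LEMMAS AND PROOFS =====

-- per-category list A produces: tiles in bucket order, each with its filtered points, empty tiles skipped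
def pvTilesWith (count : Int) (buckets : List (Int × Int × List ((Int × Int) × Int))) :
    List ((Int × Int) × List (Int × Int)) :=
  buckets.foldl (fun out b =>
    let pts := (b.2.2.filter (fun pc => pc.2 == count)).map Prod.fst
    if pts.isEmpty then out else out ++ [((b.1, b.2.1), pts)]) []

lemma pvTilesWith_gen (count : Int) (bs : List (Int × Int × List ((Int × Int) × Int)))
    (a c : List ((Int × Int) × List (Int × Int))) :
    bs.foldl (fun out b =>
      let pts := (b.2.2.filter (fun pc => pc.2 == count)).map Prod.fst
      if pts.isEmpty then out else out ++ [((b.1, b.2.1), pts)]) (a ++ c)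
      = a ++ bs.foldl (fun out b =>
      let pts := (b.2.2.filter (fun pc => pc.2 == count)).map Prod.fst
      if pts.isEmpty then out else out ++ [((b.1, b.2.1), pts)]) c := by
  induction bs generalizing c with
  | nil => rfl
  | cons b bs ih =>
      simp only [List.foldl_cons]
      split
      · exact ih c
      · rw [List.append_assoc]; exact ih _

lemma pvTilesWith_cons (count : Int) (b : Int × Int × List ((Int × Int) × Int))
    (bs : List (Int × Int × List ((Int × Int) × Int))) :
    pvTilesWith count (b :: bs)
      = (if ((b.2.2.filter (fun pc => pc.2 == count)).map Prod.fst).isEmpty then []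
         else [((b.1, b.2.1), (b.2.2.filter (fun pc => pc.2 == count)).map Prod.fst)])
        ++ pvTilesWith count bs := by
  simp only [pvTilesWith, List.foldl_cons]
  split
  · simp
  · simpa using pvTilesWith_gen count bs [((b.1, b.2.1), (b.2.2.filter (fun pc => pc.2 == count)).map Prod.fst)] []

lemma pvFoldA_eq (bs : List (Int × Int × List ((Int × Int) × Int)))
    (q g i : List ((Int × Int) × List (Int × Int))) :
    bs.foldl pvStepA (q, g, i)
      = (q ++ pvTilesWith 4 bs, g ++ pvTilesWith 3 bs, i ++ pvTilesWith 1 bs) := by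
  induction bs generalizing q g i with
  | nil => simp [pvTilesWith]
  | cons b bs ih =>
      rw [List.foldl_cons, pvTilesWith_cons, pvTilesWith_cons, pvTilesWith_cons]
      simp only [pvStepA]
      split <;> split <;> split <;> simp [ih]

-- single-category point step of B's index loop
def pvModStep (c : Int) (tile : Int × Int)
    (d : PySem.Dict (Int × Int) (List (Int × Int))) (pc : (Int × Int) × Int) :
    PySem.Dict (Int × Int) (List (Int × Int)) :=
  if pc.2 == c then d.modify tile [] (· ++ [pc.1]) else d

lemma pvStepPoint_split (tile : Int × Int)
    (d4 d3 d1 : PySem.Dict (Int × Int) (List (Int × Int))) (pc : (Int × Int) × Int) :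
    pvStepPoint tile (d4, d3, d1) pc = (pvModStep 4 tile d4 pc, pvModStep 3 tile d3 pc, pvModStep 1 tile d1 pc) := by
  simp only [pvStepPoint, pvModStep]
  split_ifs with h1 h2 h3 <;> simp_all

lemma pvInnerFold_split (tile : Int × Int) (pcs : List ((Int × Int) × Int))
    (d4 d3 d1 : PySem.Dict (Int × Int) (List (Int × Int))) :
    pcs.foldl (pvStepPoint tile) (d4, d3, d1)
      = (pcs.foldl (pvModStep 4 tile) d4, pcs.foldl (pvModStep 3 tile) d3, pcs.foldl (pvModStep 1 tile) d1) := by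
  induction pcs generalizing d4 d3 d1 with
  | nil => rfl
  | cons pc pcs ih => rw [List.foldl_cons, pvStepPoint_split, List.foldl_cons, List.foldl_cons, List.foldl_cons, ih]

lemma pvModify_modify_self (d : PySem.Dict (Int × Int) (List (Int × Int))) (k : Int × Int)
    (g h : List (Int × Int) → List (Int × Int)) :
    (d.modify k [] g).modify k [] h = d.modify k [] (h ∘ g) := by
  simp only [PySem.Dict.modify]
  rw [PySem.Dict.getD_insert_self, PySem.Dict.insert_insert_self]
  rfl

lemma pvInnerFold_eq (c : Int) (tile : Int × Int) (pcs : List ((Int × Int) × Int))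
    (d : PySem.Dict (Int × Int) (List (Int × Int))) :
    pcs.foldl (pvModStep c tile) d
      = (if ((pcs.filter (fun pc => pc.2 == c)).map Prod.fst).isEmpty then d
         else d.modify tile [] (· ++ (pcs.filter (fun pc => pc.2 == c)).map Prod.fst)) := by
  induction pcs generalizing d with
  | nil => rfl
  | cons pc pcs ih =>
      rw [List.foldl_cons]
      by_cases hc : pc.2 == c
      · simp only [pvModStep, if_pos, List.filter_cons, hc, List.map_cons, List.isEmpty_cons, if_neg Bool.false_ne_true]
        rw [ih]
        split
        · next he =>
            rw [List.isEmpty_iff] at he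
            simp [he]
        · rw [pvModify_modify_self]
          congr 1
          funext l
          simp
      · simp only [pvModStep, hc]
        rw [if_neg (by simp_all), ih]
        simp only [List.filter_cons, hc]
        rfl

lemma pvOuterFold_eq (c : Int) (bs : List (Int × Int × List ((Int × Int) × Int)))
    (d : PySem.Dict (Int × Int) (List (Int × Int)))
    (hnd : (bs.map (fun b => (b.1, b.2.1))).Nodup)
    (hfresh : ∀ b ∈ bs, d.contains (b.1, b.2.1) = false) :
    (bs.foldl (fun d b => b.2.2.foldl (pvModStep c (b.1, b.2.1)) d) d).items
      = d.items ++ pvTilesWith c bs := by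
  induction bs generalizing d with
  | nil => simp [pvTilesWith]
  | cons b bs ih =>
      rw [List.foldl_cons, pvTilesWith_cons, pvInnerFold_eq]
      rw [List.map_cons, List.nodup_cons] at hnd
      have hb : d.contains (b.1, b.2.1) = false := hfresh b (by simp)
      split
      · next he =>
          rw [ih d hnd.2 (fun b' hb' => hfresh b' (by simp [hb']))]
          simp
      · next he =>
          set f := (b.2.2.filter (fun pc => pc.2 == c)).map Prod.fst with hf
          have hget : d.getD (b.1, b.2.1) [] = [] := PySem.Dict.getD_of_not_contains d [] hb
          rw [ih]
          · simp only [PySem.Dict.modify, hget]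
            rw [PySem.Dict.items_insert_of_not_contains d _ hb]
            simp
          · exact hnd.2
          · intro b' hb'
            have hne : (b'.1, b'.2.1) ≠ (b.1, b.2.1) := by
              intro hEq
              exact hnd.1 (hEq ▸ List.mem_map_of_mem hb')
            simp only [PySem.Dict.modify]
            rw [PySem.Dict.contains_insert]
            simp [hne, hfresh b' (by simp [hb'])]

lemma pvOuterTriple_split (bs : List (Int × Int × List ((Int × Int) × Int)))
    (d4 d3 d1 : PySem.Dict (Int × Int) (List (Int × Int))) :
    bs.foldl (fun idx b => b.2.2.foldl (pvStepPoint (b.1, b.2.1)) idx) (d4, d3, d1)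
      = (bs.foldl (fun d b => b.2.2.foldl (pvModStep 4 (b.1, b.2.1)) d) d4,
         bs.foldl (fun d b => b.2.2.foldl (pvModStep 3 (b.1, b.2.1)) d) d3,
         bs.foldl (fun d b => b.2.2.foldl (pvModStep 1 (b.1, b.2.1)) d) d1) := by
  induction bs generalizing d4 d3 d1 with
  | nil => rfl
  | cons b bs ih =>
      simp only [List.foldl_cons]
      rw [pvInnerFold_split, ih]

-- ===== VERDICT (by name: the statement is the Claim_ definition above) =====
theorem classify_points_by_neighbors_spec : Claim_equal_classify_points_by_neighbors := by
  intro buckets _ hpre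
  show _ = _
  simp only [classify_points_by_neighbors, classify_points_by_neighbors_alt]
  rw [pvFoldA_eq, pvOuterTriple_split]
  have h4 := pvOuterFold_eq 4 buckets PySem.Dict.empty hpre (fun b _ => PySem.Dict.contains_empty _)
  have h3 := pvOuterFold_eq 3 buckets PySem.Dict.empty hpre (fun b _ => PySem.Dict.contains_empty _)
  have h1 := pvOuterFold_eq 1 buckets PySem.Dict.empty hpre (fun b _ => PySem.Dict.contains_empty _)
  simp only [h4, h3, h1]
  simp [PySem.Dict.empty]
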